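-- pv_equiv track=rewrite | github.com/mramirezraul71/rauli-enterprise | security_hardening.py | _high_security_validation
-- ===== SOURCE A (Python) =====
-- def _high_security_validation(sanitized: str, input_type: str) -> bool:
--     """Validaci칩n de alta seguridad"""
--     # Verificar caracteres especiales no permitidos
--     dangerous_chars = ['<', '>', '"', "'", '&', '\x00']
--     for char in dangerous_chars:
--         if char in sanitized:
--             return False
--
--     # Verificar secuencias de escape
--     escape_sequences = ['\\x', '\\u', '\\n', '\\r', '\\t']
--     for seq in escape_sequences:
--         if seq in sanitized:
--             return False
--
--     return True
-- ===== SOURCE B (Python) =====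
-- def _high_security_validation(sanitized: str, input_type: str) -> bool:
--     # Single pass remembering the previous character instead of eleven substring scans.
--     prev = None
--     for c in sanitized:
--         if c in '<>"\'&\x00':
--             return False
--         if prev == '\\' and c in 'xunrt':
--             return False
--         prev = c
--     return True
-- ===== Notes on version B (the rewrite author's own statement) =====
-- stated objective: alternative
-- what changed: Replaces A's eleven separate substring-containment scans (six dangerous characters plus five backslash escape sequences) with a single left-to-right pass that remembers the previous character and rejects on a dangerous character or on a backslash followed by x/u/n/r/t.
import Mathlib
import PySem

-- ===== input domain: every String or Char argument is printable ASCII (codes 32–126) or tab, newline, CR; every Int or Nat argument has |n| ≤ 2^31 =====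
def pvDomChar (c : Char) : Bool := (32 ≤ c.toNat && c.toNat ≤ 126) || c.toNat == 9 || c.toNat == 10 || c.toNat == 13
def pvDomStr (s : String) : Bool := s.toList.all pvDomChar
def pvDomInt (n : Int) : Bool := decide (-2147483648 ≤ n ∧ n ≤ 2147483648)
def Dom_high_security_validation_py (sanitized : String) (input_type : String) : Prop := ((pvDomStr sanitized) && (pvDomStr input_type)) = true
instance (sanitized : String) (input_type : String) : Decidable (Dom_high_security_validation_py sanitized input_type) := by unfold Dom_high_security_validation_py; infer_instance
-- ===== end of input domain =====

-- B replaces A's eleven substring scans with one pass over the characters remembering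
-- the previous character (alternative decomposition, same result).

-- ===== PORT A =====
def high_security_validation_py (sanitized : String) (input_type : String) : Bool :=
  let dangerous_chars : List String := ["<", ">", "\"", "'", "&", "\x00"]
  if dangerous_chars.any (fun ch => PySem.Str.isIn ch sanitized) then false
  else
    let escape_sequences : List String := ["\\x", "\\u", "\\n", "\\r", "\\t"]
    if escape_sequences.any (fun sq => PySem.Str.isIn sq sanitized) then false
    else true

-- ===== PORT B =====
def pvDangerChar (c : Char) : Bool :=
  c == '<' || c == '>' || c == '"' || c == '\'' || c == '&' || c == '\x00'

def pvEscChar (c : Char) : Bool :=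
  c == 'x' || c == 'u' || c == 'n' || c == 'r' || c == 't'

def pvScan : Option Char → List Char → Bool
  | _, [] => true
  | prev, c :: rest =>
    if pvDangerChar c then false
    else if prev == some '\\' && pvEscChar c then false
    else pvScan (some c) rest

def high_security_validation_py_alt (sanitized : String) (input_type : String) : Bool :=
  pvScan none sanitized.toList

-- ===== PRECONDITION & SPEC =====
def Spec_high_security_validation_py (sanitized : String) (input_type : String) (out : Bool) : Prop := out = high_security_validation_py_alt sanitized input_type
instance (sanitized : String) (input_type : String) (out : Bool) : Decidable (Spec_high_security_validation_py sanitized input_type out) := by unfold Spec_high_security_validation_py; infer_instance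

-- ===== CLAIM (what is proved, stated in full; the proofs are below) =====
def Claim_equal_high_security_validation_py : Prop := ∀ (sanitized : String) (input_type : String), Dom_high_security_validation_py sanitized input_type → Spec_high_security_validation_py sanitized input_type (high_security_validation_py sanitized input_type)

-- ===== LEMMAS AND PROOFS =====

-- the escape-pair part of pvScan, isolated
def pvEscAfter : Option Char → List Char → Bool
  | _, [] => false
  | prev, c :: rest => (prev == some '\\' && pvEscChar c) || pvEscAfter (some c) rest

theorem pvScan_eq (l : List Char) : ∀ (prev : Option Char),
    pvScan prev l = (!(l.any pvDangerChar) && !(pvEscAfter prev l)) := by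
  induction l with
  | nil => intro prev; rfl
  | cons c rest ih =>
    intro prev
    cases h1 : pvDangerChar c <;>
      cases h2 : (prev == some '\\' && pvEscChar c) <;>
        simp [pvScan, pvEscAfter, h1, h2, ih]

theorem pvEscAfter_true_iff (l : List Char) : ∀ (prev : Option Char),
    pvEscAfter prev l = true ↔
      ((prev = some '\\' ∧ ∃ e, l.head? = some e ∧ pvEscChar e = true) ∨
       ∃ l1 e l2, pvEscChar e = true ∧ l = l1 ++ '\\' :: e :: l2) := by
  induction l with
  | nil =>
    intro prev
    simp [pvEscAfter]
  | cons c rest ih =>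
    intro prev
    simp only [pvEscAfter, Bool.or_eq_true, Bool.and_eq_true, beq_iff_eq, ih (some c),
      List.head?_cons, Option.some.injEq]
    constructor
    · rintro (⟨h1, h2⟩ | ⟨h1, e, h2, h3⟩ | ⟨l1, e, l2, h1, h2⟩)
      · exact Or.inl ⟨h1, c, rfl, h2⟩
      · subst h1
        cases rest with
        | nil => simp at h2
        | cons d rest' =>
          simp only [List.head?_cons, Option.some.injEq] at h2
          subst h2
          exact Or.inr ⟨[], d, rest', h3, rfl⟩
      · exact Or.inr ⟨c :: l1, e, l2, h1, by simp [h2]⟩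
    · rintro (⟨h1, e, h2, h3⟩ | ⟨l1, e, l2, h1, h2⟩)
      · subst h2; exact Or.inl ⟨h1, h3⟩
      · cases l1 with
        | nil =>
          simp only [List.nil_append, List.cons.injEq] at h2
          obtain ⟨hc, hrest⟩ := h2
          subst hc
          refine Or.inr (Or.inl ⟨rfl, e, ?_, h1⟩)
          simp [hrest]
        | cons d l1' =>
          simp only [List.cons_append, List.cons.injEq] at h2
          obtain ⟨hc, hrest⟩ := h2
          exact Or.inr (Or.inr ⟨l1', e, l2, h1, hrest⟩)

theorem pair_infix_iff (x y : Char) (l : List Char) :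
    [x, y] <:+: l ↔ ∃ l1 l2, l = l1 ++ x :: y :: l2 := by
  constructor
  · rintro ⟨s, t, h⟩; exact ⟨s, t, by simp [← h]⟩
  · rintro ⟨s, t, h⟩; exact ⟨s, t, by simp [h]⟩

theorem any_danger_iff (l : List Char) :
    l.any pvDangerChar = true ↔
      ('<' ∈ l ∨ '>' ∈ l ∨ '"' ∈ l ∨ '\'' ∈ l ∨ '&' ∈ l ∨ '\x00' ∈ l) := by
  simp only [List.any_eq_true, pvDangerChar, Bool.or_eq_true, beq_iff_eq]
  constructor
  · rintro ⟨c, hc, (((((h | h) | h) | h) | h) | h)⟩ <;> subst h <;> tauto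
  · rintro (h | h | h | h | h | h) <;> exact ⟨_, h, by simp⟩

theorem escAfter_none_iff (l : List Char) :
    pvEscAfter none l = true ↔
      ([ '\\', 'x'] <:+: l ∨ ['\\', 'u'] <:+: l ∨ ['\\', 'n'] <:+: l ∨
       ['\\', 'r'] <:+: l ∨ ['\\', 't'] <:+: l) := by
  rw [pvEscAfter_true_iff l none]
  simp only [pair_infix_iff, pvEscChar, Bool.or_eq_true, beq_iff_eq]
  constructor
  · rintro (⟨h, _⟩ | ⟨l1, e, l2, ((((h | h) | h) | h) | h), hl⟩)
    · exact absurd h (by simp)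
    · subst h; exact Or.inl ⟨l1, l2, hl⟩
    · subst h; exact Or.inr (Or.inl ⟨l1, l2, hl⟩)
    · subst h; exact Or.inr (Or.inr (Or.inl ⟨l1, l2, hl⟩))
    · subst h; exact Or.inr (Or.inr (Or.inr (Or.inl ⟨l1, l2, hl⟩)))
    · subst h; exact Or.inr (Or.inr (Or.inr (Or.inr ⟨l1, l2, hl⟩)))
  · rintro (⟨l1, l2, h⟩ | ⟨l1, l2, h⟩ | ⟨l1, l2, h⟩ | ⟨l1, l2, h⟩ | ⟨l1, l2, h⟩) <;>
      exact Or.inr ⟨l1, _, l2, by simp, h⟩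

theorem toList_lt : ("<" : String).toList = ['<'] := rfl
theorem toList_gt : (">" : String).toList = ['>'] := rfl
theorem toList_quot : ("\"" : String).toList = ['"'] := rfl
theorem toList_apos : ("'" : String).toList = ['\''] := rfl
theorem toList_amp : ("&" : String).toList = ['&'] := rfl
theorem toList_nul : ("\x00" : String).toList = ['\x00'] := rfl
theorem toList_bx : ("\\x" : String).toList = ['\\', 'x'] := rfl
theorem toList_bu : ("\\u" : String).toList = ['\\', 'u'] := rfl
theorem toList_bn : ("\\n" : String).toList = ['\\', 'n'] := rfl
theorem toList_br : ("\\r" : String).toList = ['\\', 'r'] := rfl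
theorem toList_bt : ("\\t" : String).toList = ['\\', 't'] := rfl

theorem danger_any_eq (s : String) :
    (["<", ">", "\"", "'", "&", "\x00"].any (fun ch => PySem.Str.isIn ch s)) =
      s.toList.any pvDangerChar := by
  rw [Bool.eq_iff_iff]
  simp only [List.any_cons, List.any_nil, Bool.or_false, Bool.or_eq_true,
    PySem.Str.isIn_iff_infix, toList_lt, toList_gt, toList_quot, toList_apos, toList_amp,
    toList_nul, List.singleton_infix_iff]
  rw [any_danger_iff]

theorem esc_any_eq (s : String) :
    (["\\x", "\\u", "\\n", "\\r", "\\t"].any (fun sq => PySem.Str.isIn sq s)) =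
      pvEscAfter none s.toList := by
  rw [Bool.eq_iff_iff]
  simp only [List.any_cons, List.any_nil, Bool.or_false, Bool.or_eq_true,
    PySem.Str.isIn_iff_infix, toList_bx, toList_bu, toList_bn, toList_br, toList_bt]
  rw [escAfter_none_iff]

-- ===== VERDICT (by name: the statement is the Claim_ definition above) =====
theorem high_security_validation_py_spec : Claim_equal_high_security_validation_py := by
  intro sanitized input_type _
  unfold Spec_high_security_validation_py high_security_validation_py high_security_validation_py_alt
  have hA : (if (["<", ">", "\"", "'", "&", "\x00"].any (fun ch => PySem.Str.isIn ch sanitized)) then false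
      else if (["\\x", "\\u", "\\n", "\\r", "\\t"].any (fun sq => PySem.Str.isIn sq sanitized)) then false
      else true) =
      (!(["<", ">", "\"", "'", "&", "\x00"].any (fun ch => PySem.Str.isIn ch sanitized)) &&
       !(["\\x", "\\u", "\\n", "\\r", "\\t"].any (fun sq => PySem.Str.isIn sq sanitized))) := by
    cases hd : (["<", ">", "\"", "'", "&", "\x00"].any (fun ch => PySem.Str.isIn ch sanitized)) <;>
      cases he : (["\\x", "\\u", "\\n", "\\r", "\\t"].any (fun sq => PySem.Str.isIn sq sanitized)) <;>
        simp [hd, he]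
  rw [hA, pvScan_eq, danger_any_eq, esc_any_eq]
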